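-- pv_equiv track=rewrite | github.com/erinseepersad/assignment-7-8-9-10 | seepersadErin_assign7_part1.py | string_adjustcase
-- ===== SOURCE A (Python) =====
-- def string_adjustcase(x,y):
--     if y== 'upper' or y=='lower':
--         newstring=''
--         for i in x:
--             table=ord(i)
--             if table >= 65 and table<=90: #upper
--                 if y=='lower':# go to lowercase
--                     newstring+= chr(table+32)
--                 else:
--                     newstring+= chr(table)
--             elif table >= 97 and table <=122:#lower
--                 if y=='upper':#go to uppercase
--                     newstring+=chr(table-32)
--                 else:
--                     newstring+= chr(table)
--             else:
--                 newstring+=chr(table)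
--         return newstring
--     else:
--         return x
-- ===== SOURCE B (Python) =====
-- _UP = str.maketrans('abcdefghijklmnopqrstuvwxyz', 'ABCDEFGHIJKLMNOPQRSTUVWXYZ')
-- _LO = str.maketrans('ABCDEFGHIJKLMNOPQRSTUVWXYZ', 'abcdefghijklmnopqrstuvwxyz')
--
-- def string_adjustcase(x, y):
--     if y == 'upper':
--         return x.translate(_UP)
--     elif y == 'lower':
--         return x.translate(_LO)
--     else:
--         return x
-- ===== Notes on version B (the rewrite author's own statement) =====
-- stated objective: idiomatic
-- what changed: B replaces A's per-character ord/chr branching loop with a fixed 26-letter ASCII translation table built once with str.maketrans and applied via str.translate.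
import Mathlib
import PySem

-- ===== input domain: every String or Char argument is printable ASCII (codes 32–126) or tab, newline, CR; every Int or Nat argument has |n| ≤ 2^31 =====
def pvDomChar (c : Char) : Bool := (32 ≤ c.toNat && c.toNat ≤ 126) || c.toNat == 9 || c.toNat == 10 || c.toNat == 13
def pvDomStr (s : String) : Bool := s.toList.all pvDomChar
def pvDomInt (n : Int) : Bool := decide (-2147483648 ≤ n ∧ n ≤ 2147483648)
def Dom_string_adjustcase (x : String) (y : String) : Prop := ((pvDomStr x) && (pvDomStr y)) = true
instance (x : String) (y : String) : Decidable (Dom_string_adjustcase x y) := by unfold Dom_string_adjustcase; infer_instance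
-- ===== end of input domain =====

-- B replaces A's per-character branching loop with a fixed 26-letter ASCII translation table
-- (str.maketrans / str.translate); idiomatic, same O(n) cost, identical return value.

-- ===== PORT A =====
-- literal port of A: guard on y, then a loop over the characters appending chr(...) per branch
def string_adjustcase (x : String) (y : String) : String :=
  if y == "upper" || y == "lower" then
    String.ofList (x.toList.foldl (fun newstring i =>
      let table := i.toNat          -- ord(i)
      if 65 ≤ table ∧ table ≤ 90 then          -- upper
        if y == "lower" then newstring ++ [Char.ofNat (table + 32)]   -- go to lowercase
        else newstring ++ [Char.ofNat table]
      else if 97 ≤ table ∧ table ≤ 122 then    -- lower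
        if y == "upper" then newstring ++ [Char.ofNat (table - 32)]   -- go to uppercase
        else newstring ++ [Char.ofNat table]
      else newstring ++ [Char.ofNat table]) [])
  else x

-- ===== PORT B =====
-- the two string literals handed to str.maketrans, as character lists
def pvLowerAZ : List Char := ['a','b','c','d','e','f','g','h','i','j','k','l','m','n','o','p','q','r','s','t','u','v','w','x','y','z']
def pvUpperAZ : List Char := ['A','B','C','D','E','F','G','H','I','J','K','L','M','N','O','P','Q','R','S','T','U','V','W','X','Y','Z']

-- str.maketrans(a, b): dict mapping ord of each char of a to ord of the matching char of b
def pvMakeTrans (a : List Char) (b : List Char) : PySem.Dict Int Int :=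
  PySem.Dict.ofList ((a.zip b).map (fun p => ((p.1.toNat : Int), (p.2.toNat : Int))))

-- x.translate(t): each code point replaced by its mapping, untouched when absent
def pvTranslate (x : String) (t : PySem.Dict Int Int) : String :=
  String.ofList (x.toList.map (fun c => Char.ofNat (PySem.Dict.getD t (c.toNat : Int) (c.toNat : Int)).toNat))

def string_adjustcase_alt (x : String) (y : String) : String :=
  if y == "upper" then pvTranslate x (pvMakeTrans pvLowerAZ pvUpperAZ)
  else if y == "lower" then pvTranslate x (pvMakeTrans pvUpperAZ pvLowerAZ)
  else x

-- ===== PRECONDITION & SPEC =====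
def Spec_string_adjustcase (x : String) (y : String) (out : String) : Prop := out = string_adjustcase_alt x y
instance (x : String) (y : String) (out : String) : Decidable (Spec_string_adjustcase x y out) := by unfold Spec_string_adjustcase; infer_instance

-- ===== CLAIM (what is proved, stated in full; the proofs are below) =====
def Claim_equal_string_adjustcase : Prop := ∀ (x : String) (y : String), Dom_string_adjustcase x y → Spec_string_adjustcase x y (string_adjustcase x y)

-- ===== LEMMAS AND PROOFS =====

-- A's per-character step as a function of the code, parameters bl = (y == "lower"), bu = (y == "upper")
def pvStepG (bl bu : Bool) (n : Nat) : Char :=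
  if 65 ≤ n ∧ n ≤ 90 then
    if bl then Char.ofNat (n + 32) else Char.ofNat n
  else if 97 ≤ n ∧ n ≤ 122 then
    if bu then Char.ofNat (n - 32) else Char.ofNat n
  else Char.ofNat n

-- B's per-character step for a table
def pvStepB (t : PySem.Dict Int Int) (n : Nat) : Char :=
  Char.ofNat (PySem.Dict.getD t (n : Int) (n : Int)).toNat

-- the two tables, fully evaluated
def pvUpTab : PySem.Dict Int Int := PySem.Dict.mk [(97, 65), (98, 66), (99, 67), (100, 68), (101, 69), (102, 70), (103, 71), (104, 72), (105, 73), (106, 74), (107, 75), (108, 76), (109, 77), (110, 78), (111, 79), (112, 80), (113, 81), (114, 82), (115, 83), (116, 84), (117, 85), (118, 86), (119, 87), (120, 88), (121, 89), (122, 90)]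
def pvLoTab : PySem.Dict Int Int := PySem.Dict.mk [(65, 97), (66, 98), (67, 99), (68, 100), (69, 101), (70, 102), (71, 103), (72, 104), (73, 105), (74, 106), (75, 107), (76, 108), (77, 109), (78, 110), (79, 111), (80, 112), (81, 113), (82, 114), (83, 115), (84, 116), (85, 117), (86, 118), (87, 119), (88, 120), (89, 121), (90, 122)]

theorem pvUpTab_eq : pvMakeTrans pvLowerAZ pvUpperAZ = pvUpTab := by rfl
theorem pvLoTab_eq : pvMakeTrans pvUpperAZ pvLowerAZ = pvLoTab := by rfl

set_option maxRecDepth 8192 in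
theorem pvStep_up : ∀ n < 127, pvStepG false true n = pvStepB pvUpTab n := by decide

set_option maxRecDepth 8192 in
theorem pvStep_lo : ∀ n < 127, pvStepG true false n = pvStepB pvLoTab n := by decide

theorem pvCharCodeLt (c : Char) (h : pvDomChar c = true) : c.toNat < 127 := by
  simp [pvDomChar] at h
  omega

-- A's loop is a map of pvStepG over the characters
theorem pvFoldA (y : String) (x : List Char) :
    (x.foldl (fun newstring i =>
      let table := i.toNat
      if 65 ≤ table ∧ table ≤ 90 then
        if y == "lower" then newstring ++ [Char.ofNat (table + 32)]
        else newstring ++ [Char.ofNat table]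
      else if 97 ≤ table ∧ table ≤ 122 then
        if y == "upper" then newstring ++ [Char.ofNat (table - 32)]
        else newstring ++ [Char.ofNat table]
      else newstring ++ [Char.ofNat table]) [])
    = x.map (fun i => pvStepG (y == "lower") (y == "upper") i.toNat) := by
  have h : (fun (newstring : List Char) (i : Char) =>
      let table := i.toNat
      if 65 ≤ table ∧ table ≤ 90 then
        if y == "lower" then newstring ++ [Char.ofNat (table + 32)]
        else newstring ++ [Char.ofNat table]
      else if 97 ≤ table ∧ table ≤ 122 then
        if y == "upper" then newstring ++ [Char.ofNat (table - 32)]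
        else newstring ++ [Char.ofNat table]
      else newstring ++ [Char.ofNat table])
      = (fun newstring i => newstring ++ [pvStepG (y == "lower") (y == "upper") i.toNat]) := by
    funext newstring i
    simp only [pvStepG]
    split_ifs <;> rfl
  rw [h, PySem.List.foldl_append_singleton_eq_map]
  rfl

-- ===== VERDICT (by name: the statement is the Claim_ definition above) =====
theorem string_adjustcase_spec : Claim_equal_string_adjustcase := by
  intro x y hdom
  have hx : ∀ c ∈ x.toList, c.toNat < 127 := by
    intro c hc
    apply pvCharCodeLt
    have h1 : pvDomStr x = true := ((Bool.and_eq_true _ _).mp hdom).1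
    simp only [pvDomStr, List.all_eq_true] at h1
    exact h1 c hc
  unfold Spec_string_adjustcase string_adjustcase string_adjustcase_alt pvTranslate
  rw [pvFoldA y x.toList]
  by_cases hu : y = "upper"
  · subst hu
    have h1 : ("upper" == "upper") = true := by simp
    have h2 : ("upper" == "lower") = false := by simp
    rw [h1, h2]
    simp only [Bool.true_or, if_true]
    rw [pvUpTab_eq]
    congr 1
    apply List.map_congr_left
    intro c hc
    exact pvStep_up c.toNat (hx c hc)
  · have h1 : (y == "upper") = false := by simp [hu]
    rw [h1]
    by_cases hl : y = "lower"
    · subst hl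
      have h2 : ("lower" == "lower") = true := by simp
      rw [h2]
      simp only [Bool.false_or, if_true]
      rw [pvLoTab_eq]
      congr 1
      apply List.map_congr_left
      intro c hc
      exact pvStep_lo c.toNat (hx c hc)
    · have h2 : (y == "lower") = false := by simp [hl]
      rw [h2]
      simp
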